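-- pv_equiv track=rewrite | github.com/MetroidPrimeModding/prime-practice-native | PrimeAPI2/python/parse_and_generate_patch.py | strip_spaces_except_const
-- ===== SOURCE A (Python) =====
-- def strip_spaces_except_const(line):
--     line = line.strip()
--     # TODO: do this backslash nonsense in the cmake file instead of here, somehow
--     line = line.replace('\\', '')
--     strippedLine = ''
--     for chrIdx in range(0, len(line)):
--         chr = line[chrIdx]
--
--         if chr != ' ':
--             strippedLine += chr
--         else:
--             if chrIdx >= 5 and line[chrIdx - 5: chrIdx] == "const":
--                 # Verify this const precedes a type name by verifying the next non-whitespace character is not a comma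
--                 for chrIdx2 in range(chrIdx, len(line)):
--                     if line[chrIdx2] != ' ':
--                         if line[chrIdx2] != ',':
--                             strippedLine += chr
--                         break
--     return strippedLine
-- ===== SOURCE B (Python) =====
-- def strip_spaces_except_const(line):
--     # Phase 1: tokenize into maximal nonspace words (spaces collapse away).
--     line = line.strip().replace('\\', '')
--     words = []
--     cur = ''
--     for c in line:
--         if c == ' ':
--             if cur:
--                 words.append(cur)
--                 cur = ''
--         else:
--             cur += c
--     if cur:
--         words.append(cur)
--     # Phase 2: join words, keeping a single space only after a word ending in
--     # 'const' whose successor does not start with ','.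
--     pieces = []
--     for w, nxt in zip(words, words[1:] + ['']):
--         keep = w.endswith('const') and nxt and not nxt.startswith(',')
--         pieces.append(w + (' ' if keep else ''))
--     return ''.join(pieces)
-- ===== Notes on version B (the rewrite author's own statement) =====
-- stated objective: simpler
-- what changed: A's single indexed character loop with a 5-character look-back slice and an inner forward scan is replaced by a two-phase pass: tokenize the line into maximal nonspace words, then join the words, keeping one space exactly after a word that ends in 'const' and whose successor word does not start with ','.
import Mathlib
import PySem

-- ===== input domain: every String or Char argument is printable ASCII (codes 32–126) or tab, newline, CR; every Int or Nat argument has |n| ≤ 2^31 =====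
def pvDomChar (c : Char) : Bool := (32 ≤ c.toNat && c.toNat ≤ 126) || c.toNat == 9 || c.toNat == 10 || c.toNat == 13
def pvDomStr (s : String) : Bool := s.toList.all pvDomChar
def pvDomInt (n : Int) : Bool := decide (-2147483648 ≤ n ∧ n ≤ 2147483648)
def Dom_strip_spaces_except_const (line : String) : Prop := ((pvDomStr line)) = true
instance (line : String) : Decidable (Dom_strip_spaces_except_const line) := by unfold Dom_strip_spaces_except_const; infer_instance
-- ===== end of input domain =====

-- B replaces A's indexed character loop (5-character look-back slice plus an inner
-- forward scan) by a two-phase pass: tokenize into maximal nonspace words, then join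
-- them, keeping one space after a word ending in 'const' whose successor does not
-- start with ','. Objective: simpler decomposition; same asymptotic cost.

-- ===== PORT A =====
-- inner loop 'for chrIdx2 in range(chrIdx, len(line)): … break' — returns the chars it appends
def pvInnerA (l : List Char) : List Int → List Char
  | [] => []
  | j :: rest =>
    let c := PySem.List.pyGetD l j ' '
    if c ≠ ' ' then (if c ≠ ',' then [' '] else []) else pvInnerA l rest

-- one iteration of A's 'for chrIdx in range(0, len(line))' loop body
def pvStepA (l : List Char) (acc : List Char) (i : Int) : List Char :=
  let c := PySem.List.pyGetD l i ' '
  if c ≠ ' ' then acc ++ [c]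
  else if 5 ≤ i ∧ PySem.List.slice l (some (i - 5)) (some i) = ['c', 'o', 'n', 's', 't'] then
    acc ++ pvInnerA l (PySem.List.pyRange i (l.length : Int) 1)
  else acc

def strip_spaces_except_const (line : String) : String :=
  let l := (PySem.Str.replace (PySem.Str.strip line) "\\" "").toList
  String.ofList ((PySem.List.pyRange 0 (l.length : Int) 1).foldl (pvStepA l) [])

-- ===== PORT B =====
-- phase 1 of Source B: the accumulator loop building the word list
def pvWordsB (l : List Char) : List (List Char) :=
  let s := l.foldl
    (fun (s : List (List Char) × List Char) c =>
      if c = ' ' then (if s.2 ≠ [] then (s.1 ++ [s.2], ([] : List Char)) else s)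
      else (s.1, s.2 ++ [c]))
    ([], [])
  if s.2 ≠ [] then s.1 ++ [s.2] else s.1

-- phase 2 of Source B: one piece per word (the word plus its optional kept space)
def pvPieceB (p : List Char × List Char) : List Char :=
  p.1 ++ (if PySem.Chars.endswith p.1 ['c', 'o', 'n', 's', 't'] = true ∧ p.2 ≠ [] ∧
            ¬ PySem.Chars.startswith p.2 [','] = true then [' '] else [])

def pvJoinB (ws : List (List Char)) : List Char :=
  PySem.Chars.join [] ((ws.zip (ws.drop 1 ++ [[]])).map pvPieceB)

def strip_spaces_except_const_alt (line : String) : String :=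
  let l := (PySem.Str.replace (PySem.Str.strip line) "\\" "").toList
  String.ofList (pvJoinB (pvWordsB l))

-- ===== PRECONDITION & SPEC =====
def Spec_strip_spaces_except_const (line : String) (out : String) : Prop := out = strip_spaces_except_const_alt line
instance (line : String) (out : String) : Decidable (Spec_strip_spaces_except_const line out) := by unfold Spec_strip_spaces_except_const; infer_instance

-- ===== CLAIM (what is proved, stated in full; the proofs are below) =====
def Claim_equal_strip_spaces_except_const : Prop := ∀ (line : String), Dom_strip_spaces_except_const line → Spec_strip_spaces_except_const line (strip_spaces_except_const line)

-- ===== LEMMAS AND PROOFS =====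

-- 'is the next non-space character (if any) different from a comma?'
def pvNextOk (cs : List Char) : Bool :=
  match cs.dropWhile (· == ' ') with
  | [] => false
  | d :: _ => d != ','

-- common recursive form of both programs: prev is the reversed processed prefix
def pvGsim : List Char → List Char → List Char
  | _, [] => []
  | prev, c :: cs =>
    if c = ' ' then
      (if prev.take 5 = ['t', 's', 'n', 'o', 'c'] ∧ pvNextOk cs = true then [' '] else []) ++
        pvGsim (c :: prev) cs
    else c :: pvGsim (c :: prev) cs

-- recursive form of B's tokenizer, with the pending partial word as argument
def pvWordsAux : List Char → List Char → List (List Char)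
  | cur, [] => if cur = [] then [] else [cur]
  | cur, c :: cs =>
    if c = ' ' then (if cur = [] then pvWordsAux [] cs else cur :: pvWordsAux [] cs)
    else pvWordsAux (cur ++ [c]) cs

theorem pvRevTake (l : List Char) (n : Nat) :
    l.reverse.take n = (l.drop (l.length - n)).reverse := by
  rw [← List.reverse_reverse (l.reverse.take n), ← List.rtake_eq_reverse_take_reverse]
  rfl

theorem pvGsim_space (prev cs : List Char) :
    pvGsim prev (' ' :: cs) =
      (if prev.take 5 = ['t', 's', 'n', 'o', 'c'] ∧ pvNextOk cs = true then [' '] else []) ++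
        pvGsim (' ' :: prev) cs := by
  simp [pvGsim]

theorem pvGsim_char (prev : List Char) (c : Char) (cs : List Char) (h : c ≠ ' ') :
    pvGsim prev (c :: cs) = c :: pvGsim (c :: prev) cs := by
  simp [pvGsim, h]

theorem pvJoin_nil_cons (p : List Char) (ps : List (List Char)) :
    PySem.Chars.join [] (p :: ps) = p ++ PySem.Chars.join [] ps := by
  cases ps <;> simp [PySem.Chars.join, List.intercalate, List.intersperse]

theorem pvJoinB_cons (w : List Char) (ws : List (List Char)) :
    pvJoinB (w :: ws) =
      w ++ (if PySem.Chars.endswith w ['c', 'o', 'n', 's', 't'] = true ∧ ws.headD [] ≠ [] ∧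
              ¬ PySem.Chars.startswith (ws.headD []) [','] = true then [' '] else []) ++
        pvJoinB ws := by
  cases ws with
  | nil => simp [pvJoinB, pvPieceB, PySem.Chars.join, List.intercalate]
  | cons v ws' =>
    have hz : ((w :: v :: ws').zip ((w :: v :: ws').drop 1 ++ [[]])) =
        (w, v) :: ((v :: ws').zip ((v :: ws').drop 1 ++ [[]])) := by
      simp
    unfold pvJoinB
    rw [hz]
    simp only [List.map_cons, pvJoin_nil_cons]
    simp [pvPieceB, List.append_assoc]

theorem pvWordsAux_ne_nil : ∀ (l cur : List Char), [] ∈ pvWordsAux cur l → False := by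
  intro l
  induction l with
  | nil =>
    intro cur h
    by_cases hc : cur = [] <;> simp [pvWordsAux, hc] at h
  | cons c cs ih =>
    intro cur h
    unfold pvWordsAux at h
    split_ifs at h with h1 h2
    · exact ih [] h
    · rcases List.mem_cons.1 h with h3 | h3
      · exact h2 h3.symm
      · exact ih [] h3
    · exact ih (cur ++ [c]) h

theorem pvWordsAux_head : ∀ (t cur : List Char), cur ≠ [] →
    (pvWordsAux cur t).head? = some (cur ++ t.takeWhile (· != ' ')) := by
  intro t
  induction t with
  | nil => intro cur h; simp [pvWordsAux, h]
  | cons c cs ih =>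
    intro cur h
    by_cases hc : c = ' '
    · subst hc; simp [pvWordsAux, h]
    · simp [pvWordsAux, hc, ih (cur ++ [c]) (by simp)]

theorem pvNextOk_words (cs : List Char) :
    pvNextOk cs = (match pvWordsAux [] cs with
      | [] => false
      | w :: _ => !PySem.Chars.startswith w [',']) := by
  induction cs with
  | nil => rfl
  | cons c t ih =>
    by_cases hc : c = ' '
    · subst hc
      rw [show pvWordsAux [] (' ' :: t) = pvWordsAux [] t from by simp [pvWordsAux]]
      rw [← ih]
      simp [pvNextOk]
    · rw [show pvWordsAux [] (c :: t) = pvWordsAux [c] t from by simp [pvWordsAux, hc]]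
      have hh := pvWordsAux_head t [c] (by simp)
      cases hw : pvWordsAux [c] t with
      | nil => rw [hw] at hh; simp at hh
      | cons w ws =>
        rw [hw] at hh
        simp only [List.head?_cons, Option.some.injEq, List.singleton_append] at hh
        have hnx : pvNextOk (c :: t) = (c != ',') := by
          simp [pvNextOk, hc]
        have hsw : PySem.Chars.startswith w [','] = (c == ',') := by
          cases hcc : (c == ',') with
          | false =>
            apply Bool.eq_false_iff.mpr
            intro hstart
            have hpre := (PySem.Chars.startswith_iff w [',']).mp hstart
            rw [hh] at hpre
            rcases List.cons_prefix_cons.1 hpre with ⟨h1, -⟩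
            have hcne : ¬ c = ',' := by simpa using hcc
            exact hcne h1.symm
          | true =>
            apply (PySem.Chars.startswith_iff w [',']).mpr
            rw [hh]
            have hceq : c = ',' := by simpa using hcc
            exact List.cons_prefix_cons.2 ⟨hceq.symm, List.nil_prefix⟩
        rw [hnx]
        show (c != ',') = !PySem.Chars.startswith w [',']
        rw [hsw]
        rfl

theorem pvCond_iff (cur prev0 : List Char)
    (hp : prev0 = [] ∨ prev0.head? = some ' ') :
    ((cur.reverse ++ prev0).take 5 = ['t', 's', 'n', 'o', 'c']) ↔
      PySem.Chars.endswith cur ['c', 'o', 'n', 's', 't'] = true := by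
  rw [PySem.Chars.endswith_iff]
  by_cases h5 : 5 ≤ cur.length
  · have hrl : (5 : Nat) ≤ cur.reverse.length := by simpa using h5
    rw [List.take_append_of_le_length hrl, pvRevTake, List.reverse_eq_iff,
      List.suffix_iff_eq_drop]
    simp [eq_comm]
  · constructor
    · intro h
      exfalso
      have hleneq := congrArg List.length h
      simp at hleneq
      have hidx : cur.length < 5 := by omega
      have hp0 : prev0 ≠ [] := by
        intro h0
        subst h0
        simp at hleneq
        omega
      rcases hp with h0 | hh
      · exact hp0 h0
      have h2 : ((cur.reverse ++ prev0).take 5)[cur.length]? = prev0[0]? := by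
        rw [List.getElem?_take_of_lt hidx, List.getElem?_append_right (by simp)]
        simp
      have h3 : (['t', 's', 'n', 'o', 'c'] : List Char)[cur.length]? = some ' ' := by
        rw [← h, h2, ← List.head?_eq_getElem?, hh]
      set m := cur.length with hm
      interval_cases m <;> simp at h3
    · intro h
      exfalso
      have hle := h.length_le
      simp at hle
      omega

theorem pvGetD_at (l : List Char) (k : Nat) (hlt : k < l.length) :
    PySem.List.pyGetD l (k : Int) ' ' = l[k] := by
  rw [PySem.List.pyGetD_natCast]
  simp [List.getD_eq_getElem?_getD, List.getElem?_eq_getElem hlt]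

theorem pvInnerA_eq (l : List Char) :
    ∀ k : Nat, k ≤ l.length →
      pvInnerA l (PySem.List.pyRange (k : Int) (l.length : Int) 1) =
        if pvNextOk (l.drop k) = true then [' '] else [] := by
  intro k
  induction hn : l.length - k generalizing k with
  | zero =>
    intro hk
    have hkl : k = l.length := by omega
    subst hkl
    rw [PySem.List.pyRange_one_eq_nil (le_refl _)]
    simp [pvInnerA, pvNextOk]
  | succ n ih =>
    intro hk
    have hlt : k < l.length := by omega
    rw [PySem.List.pyRange_one_cons (by exact_mod_cast hlt)]
    have hget := pvGetD_at l k hlt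
    have hdrop : l.drop k = l[k] :: l.drop (k + 1) := List.drop_eq_getElem_cons hlt
    have hcast : ((k : Int) + 1) = ((k + 1 : Nat) : Int) := by push_cast; ring
    by_cases hsp : l[k] = ' '
    · have h2 : pvInnerA l ((k : Int) :: PySem.List.pyRange ((k : Int) + 1) (l.length : Int) 1) =
          pvInnerA l (PySem.List.pyRange ((k : Int) + 1) (l.length : Int) 1) := by
        simp [pvInnerA, hget, hsp]
      rw [h2, hcast, ih (k + 1) (by omega) (by omega), hdrop]
      simp [pvNextOk, hsp]
    · have hbeq : (l[k] == ' ') = false := by simpa using hsp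
      have hnx2 : pvNextOk (l.drop k) = (l[k] != ',') := by
        unfold pvNextOk
        rw [hdrop, List.dropWhile_cons, hbeq]
        simp only [Bool.false_eq_true, if_false]
      by_cases hcm : l[k] = ','
      · simp [pvInnerA, hget, hcm, hnx2]
      · simp [pvInnerA, hget, hsp, hcm, hnx2]

theorem pvCondA (l : List Char) (k : Nat) (hk : k ≤ l.length) :
    ((5 ≤ (k : Int) ∧
        PySem.List.slice l (some ((k : Int) - 5)) (some (k : Int)) = ['c', 'o', 'n', 's', 't'])
      ↔ (l.take k).reverse.take 5 = ['t', 's', 'n', 'o', 'c']) := by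
  by_cases h5 : 5 ≤ k
  · have hcast : ((k : Int) - 5) = ((k - 5 : Nat) : Int) := by omega
    rw [hcast, PySem.List.slice_natCast]
    have h1 : k - (k - 5) = 5 := by omega
    rw [h1]
    have hlen : (l.take k).length = k := by
      simp [List.length_take]
      omega
    have h2 : (l.take k).reverse.take 5 = ((l.take k).drop (k - 5)).reverse := by
      rw [pvRevTake, hlen]
    have h3 : (l.take k).drop (k - 5) = (l.drop (k - 5)).take 5 := by
      have h4 : (k - 5) + 5 = k := by omega
      rw [List.take_drop, h4]
    rw [h2, h3]
    constructor
    · rintro ⟨-, h⟩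
      rw [h]
      rfl
    · intro h
      refine ⟨by exact_mod_cast h5, ?_⟩
      rw [List.reverse_eq_iff] at h
      exact h.trans (by rfl)
  · constructor
    · rintro ⟨h, -⟩
      exfalso
      omega
    · intro h
      exfalso
      have := congrArg List.length h
      simp [List.length_take] at this
      omega

theorem pvFoldA_eq (l : List Char) :
    ∀ (k : Nat) (acc : List Char), k ≤ l.length →
      (PySem.List.pyRange (k : Int) (l.length : Int) 1).foldl (pvStepA l) acc =
        acc ++ pvGsim ((l.take k).reverse) (l.drop k) := by
  intro k
  induction hn : l.length - k generalizing k with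
  | zero =>
    intro acc hk
    have hkl : k = l.length := by omega
    subst hkl
    rw [PySem.List.pyRange_one_eq_nil (le_refl _)]
    simp [pvGsim, List.drop_length]
  | succ n ih =>
    intro acc hk
    have hlt : k < l.length := by omega
    rw [PySem.List.pyRange_one_cons (by exact_mod_cast hlt)]
    have hget := pvGetD_at l k hlt
    have hdrop : l.drop k = l[k] :: l.drop (k + 1) := List.drop_eq_getElem_cons hlt
    have hcast : ((k : Int) + 1) = ((k + 1 : Nat) : Int) := by push_cast; ring
    have htake : (l.take (k + 1)).reverse = l[k] :: (l.take k).reverse := by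
      rw [List.take_add_one]
      simp [List.getElem?_eq_getElem hlt]
    simp only [List.foldl_cons]
    rw [hcast, ih (k + 1) (by omega) (pvStepA l acc (k : Int)) (by omega), htake, hdrop]
    by_cases hsp : l[k] = ' '
    · have hinner : pvInnerA l (PySem.List.pyRange (k : Int) (l.length : Int) 1) =
          if pvNextOk (l.drop (k + 1)) = true then [' '] else [] := by
        rw [pvInnerA_eq l k hk, hdrop]
        simp [pvNextOk, hsp]
      rw [hsp, pvGsim_space]
      simp only [pvStepA, hget, hsp]
      rw [hinner]
      by_cases hcnd : (5 ≤ (k : Int) ∧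
          PySem.List.slice l (some ((k : Int) - 5)) (some (k : Int)) = ['c', 'o', 'n', 's', 't'])
      · rw [if_pos hcnd]
        have hpt := (pvCondA l k hk).mp hcnd
        by_cases hnx : pvNextOk (l.drop (k + 1)) = true <;>
          simp [hpt, hnx, List.append_assoc]
      · rw [if_neg hcnd]
        have hpt : ¬ (l.take k).reverse.take 5 = ['t', 's', 'n', 'o', 'c'] :=
          fun h => hcnd ((pvCondA l k hk).mpr h)
        simp [hpt]
    · rw [pvGsim_char _ _ _ hsp]
      simp [pvStepA, hget, hsp, List.append_assoc]

theorem pvFoldW (l : List Char) : ∀ (ws : List (List Char)) (cur : List Char),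
    (let s := l.foldl
        (fun (s : List (List Char) × List Char) c =>
          if c = ' ' then (if s.2 ≠ [] then (s.1 ++ [s.2], ([] : List Char)) else s)
          else (s.1, s.2 ++ [c]))
        (ws, cur);
     if s.2 ≠ [] then s.1 ++ [s.2] else s.1) = ws ++ pvWordsAux cur l := by
  induction l with
  | nil => intro ws cur; by_cases h : cur = [] <;> simp [pvWordsAux, h]
  | cons c cs ih =>
    intro ws cur
    by_cases hc : c = ' '
    · subst hc
      by_cases h : cur = []
      · subst h
        simp only [List.foldl_cons]
        simpa [pvWordsAux] using ih ws []
      · simp only [List.foldl_cons]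
        have h2 := ih (ws ++ [cur]) []
        simpa [pvWordsAux, h, List.append_assoc] using h2
    · simp only [List.foldl_cons]
      simpa [pvWordsAux, hc] using ih ws (cur ++ [c])

theorem pvWordsB_eq (l : List Char) : pvWordsB l = pvWordsAux [] l := by
  have h := pvFoldW l [] []
  simpa [pvWordsB] using h

theorem pvMain : ∀ (l cur prev0 : List Char),
    (prev0 = [] ∨ prev0.head? = some ' ') →
    pvJoinB (pvWordsAux cur l) = cur ++ pvGsim (cur.reverse ++ prev0) l := by
  intro l
  induction l with
  | nil =>
    intro cur prev0 hp
    by_cases hc : cur = []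
    · simp [hc, pvWordsAux, pvJoinB, pvGsim]
    · rw [show pvWordsAux cur [] = [cur] from by simp [pvWordsAux, hc]]
      simp [pvJoinB, pvPieceB, pvGsim, PySem.Chars.join, List.intercalate]
  | cons c cs ih =>
    intro cur prev0 hp
    by_cases hc : c = ' '
    · subst hc
      by_cases hnil : cur = []
      · subst hnil
        rw [show pvWordsAux [] (' ' :: cs) = pvWordsAux [] cs from by simp [pvWordsAux]]
        rw [ih [] (' ' :: prev0) (Or.inr rfl)]
        have hcnd : ¬ ((([] : List Char).reverse ++ prev0).take 5 = ['t', 's', 'n', 'o', 'c'] ∧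
            pvNextOk cs = true) := by
          rintro ⟨h1, -⟩
          rcases hp with h | h
          · subst h; simp at h1
          · cases prev0 with
            | nil => simp at h
            | cons a t =>
              simp at h
              subst h
              simp at h1
        simp only [List.reverse_nil, List.nil_append] at *
        rw [pvGsim_space, if_neg (by simpa using hcnd)]
        simp
      · rw [show pvWordsAux cur (' ' :: cs) = cur :: pvWordsAux [] cs from by
            simp [pvWordsAux, hnil]]
        rw [pvJoinB_cons]
        rw [ih [] (' ' :: (cur.reverse ++ prev0)) (Or.inr rfl)]
        have hcs : ((pvWordsAux [] cs).headD [] ≠ [] ∧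
            ¬ PySem.Chars.startswith ((pvWordsAux [] cs).headD []) [','] = true) ↔
              pvNextOk cs = true := by
          rw [pvNextOk_words]
          cases hw : pvWordsAux [] cs with
          | nil => simp
          | cons w ws =>
            have hwne : w ≠ [] := by
              intro h
              exact pvWordsAux_ne_nil cs [] (by rw [hw, h]; simp)
            simp [hwne]
        have hcond := pvCond_iff cur prev0 hp
        have key : (PySem.Chars.endswith cur ['c', 'o', 'n', 's', 't'] = true ∧
            (pvWordsAux [] cs).headD [] ≠ [] ∧
              ¬ PySem.Chars.startswith ((pvWordsAux [] cs).headD []) [','] = true) ↔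
            ((cur.reverse ++ prev0).take 5 = ['t', 's', 'n', 'o', 'c'] ∧ pvNextOk cs = true) :=
          and_congr hcond.symm hcs
        rw [pvGsim_space, if_congr key rfl rfl]
        simp [List.append_assoc]
    · rw [show pvWordsAux cur (c :: cs) = pvWordsAux (cur ++ [c]) cs from by
          simp [pvWordsAux, hc]]
      rw [ih (cur ++ [c]) prev0 hp, pvGsim_char _ _ _ hc]
      simp [List.append_assoc]

theorem pvCore (l : List Char) :
    (PySem.List.pyRange 0 (l.length : Int) 1).foldl (pvStepA l) [] = pvJoinB (pvWordsB l) := by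
  have hA := pvFoldA_eq l 0 [] (Nat.zero_le _)
  simp only [Nat.cast_zero, List.take_zero, List.reverse_nil, List.drop_zero,
    List.nil_append] at hA
  have hB := pvMain l [] [] (Or.inl rfl)
  simp only [List.reverse_nil, List.nil_append] at hB
  rw [pvWordsB_eq, hB, hA]

-- ===== VERDICT (by name: the statement is the Claim_ definition above) =====
theorem strip_spaces_except_const_spec : Claim_equal_strip_spaces_except_const := by
  intro line _
  show strip_spaces_except_const line = strip_spaces_except_const_alt line
  simp only [strip_spaces_except_const, strip_spaces_except_const_alt]
  exact congrArg String.ofList (pvCore _)
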